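-- pv_equiv track=rewrite | github.com/Tusharbhawsar/python_learning | interview_prep2/fine_tune_end_time.py | get_mute_section_array
-- ===== SOURCE A (Python) =====
-- def get_mute_section_array(non_mute_array, duration):
--     last_v = 0
--     mute_array = []
--     for non_mute_i in non_mute_array:
--         st, et = non_mute_i
--         current_mute_st, current_mute_et = last_v, st
--         mute_array.append([current_mute_st, current_mute_et])
--         last_v = et
--     if duration - last_v > 0:
--         mute_array.append([last_v, duration])
--     return mute_array
-- ===== SOURCE B (Python) =====
-- def get_mute_section_array(non_mute_array, duration):
--     def go(prev_end, rest):
--         if not rest: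
--             return [[prev_end, duration]] if duration > prev_end else []
--         (st, et) = rest[0]
--         return [[prev_end, st]] + go(et, rest[1:])
--     return go(0, non_mute_array)
-- ===== Notes on version B (the rewrite author's own statement) =====
-- stated objective: alternative
-- what changed: Replaces the accumulator-threaded loop (last_v carried forward, output appended, tail gap checked after the loop) with a structural recursion that builds the result front-to-back by consing and moves the trailing-gap test into the base case.
import Mathlib
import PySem

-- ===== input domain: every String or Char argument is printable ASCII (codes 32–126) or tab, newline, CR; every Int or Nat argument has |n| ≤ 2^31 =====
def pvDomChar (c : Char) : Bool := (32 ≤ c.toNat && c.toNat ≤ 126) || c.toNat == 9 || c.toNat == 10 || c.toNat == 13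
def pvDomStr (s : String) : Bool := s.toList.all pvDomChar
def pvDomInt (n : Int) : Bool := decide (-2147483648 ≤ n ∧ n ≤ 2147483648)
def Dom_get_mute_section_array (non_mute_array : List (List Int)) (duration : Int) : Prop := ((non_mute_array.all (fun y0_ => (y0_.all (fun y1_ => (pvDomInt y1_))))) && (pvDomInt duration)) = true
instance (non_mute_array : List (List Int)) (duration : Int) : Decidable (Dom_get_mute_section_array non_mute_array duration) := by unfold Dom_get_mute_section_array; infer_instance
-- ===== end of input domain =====

-- B replaces A's accumulator-threaded loop with a structural recursion that conses
-- gaps front-to-back and tests the trailing gap in the base case; same O(n) cost.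


-- ===== PORT A =====
-- one loop iteration: unpack st, et; append [last_v, st]; last_v := et
-- (the fallthrough branch is unreachable under Pre_: Python raises there)
def pvStepA (acc : Int × List (List Int)) (nm : List Int) : Int × List (List Int) :=
  match nm with
  | [st, et] => (et, acc.2 ++ [[acc.1, st]])
  | _ => acc

def get_mute_section_array (non_mute_array : List (List Int)) (duration : Int) : List (List Int) :=
  let r := non_mute_array.foldl pvStepA (0, [])
  if duration - r.1 > 0 then r.2 ++ [[r.1, duration]] else r.2

-- ===== PORT B =====
-- the inner recursion go(prev_end, rest) of Source B (duration is in scope)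
-- (unpacking rest[0] raises in Python on a non-pair; unreachable under Pre_)
def pvGoB (duration : Int) (prev_end : Int) (rest : List (List Int)) : List (List Int) :=
  match rest with
  | [] => if duration > prev_end then [[prev_end, duration]] else []
  | nm :: tail =>
    match nm with
    | [st, et] => [[prev_end, st]] ++ pvGoB duration et tail
    | _ => []

def get_mute_section_array_alt (non_mute_array : List (List Int)) (duration : Int) : List (List Int) :=
  pvGoB duration 0 non_mute_array

-- ===== PRECONDITION & SPEC =====
-- Pre_ excludes exactly the inputs where Python A raises (ValueError: a sublist that is not a pair).
def Pre_get_mute_section_array (non_mute_array : List (List Int)) (duration : Int) : Prop :=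
  ∀ nm ∈ non_mute_array, nm.length = 2
instance (non_mute_array : List (List Int)) (duration : Int) : Decidable (Pre_get_mute_section_array non_mute_array duration) := by unfold Pre_get_mute_section_array; infer_instance

def pvWitness_get_mute_section_array : List (List Int) × Int := ([[1, 3], [5, 7]], 10)

def Spec_get_mute_section_array (non_mute_array : List (List Int)) (duration : Int) (out : List (List Int)) : Prop := out = get_mute_section_array_alt non_mute_array duration
instance (non_mute_array : List (List Int)) (duration : Int) (out : List (List Int)) : Decidable (Spec_get_mute_section_array non_mute_array duration out) := by unfold Spec_get_mute_section_array; infer_instance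

-- ===== CLAIM (what is proved, stated in full; the proofs are below) =====
def Claim_equal_get_mute_section_array : Prop := ∀ (non_mute_array : List (List Int)) (duration : Int), Dom_get_mute_section_array non_mute_array duration → Pre_get_mute_section_array non_mute_array duration → Spec_get_mute_section_array non_mute_array duration (get_mute_section_array non_mute_array duration)

-- ===== LEMMAS AND PROOFS =====

-- A's fold only ever appends to the carried output list.
theorem pvFoldA_acc (na : List (List Int)) : ∀ (last : Int) (acc : List (List Int)),
    na.foldl pvStepA (last, acc) =
      ((na.foldl pvStepA (last, [])).1, acc ++ (na.foldl pvStepA (last, [])).2) := by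
  induction na with
  | nil => intro last acc; simp
  | cons nm rest ih =>
    intro last acc
    match nm with
    | [st, et] =>
      simp only [List.foldl_cons, pvStepA]
      rw [ih et (acc ++ [[last, st]]), ih et ([] ++ [[last, st]])]
      simp
    | [] => simp only [List.foldl_cons, pvStepA]; exact ih last acc
    | [x] => simp only [List.foldl_cons, pvStepA]; exact ih last acc
    | x :: y :: z :: w => simp only [List.foldl_cons, pvStepA]; exact ih last acc

-- A's loop followed by the tail check equals B's recursion, for any starting last_v.
theorem pvA_eq_goB (na : List (List Int)) : ∀ (last : Int) (d : Int),
    (∀ nm ∈ na, nm.length = 2) →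
    (let r := na.foldl pvStepA (last, []);
     if d - r.1 > 0 then r.2 ++ [[r.1, d]] else r.2) = pvGoB d last na := by
  induction na with
  | nil =>
    intro last d _
    simp only [List.foldl_nil, pvGoB]
    by_cases h : d - last > 0
    · rw [if_pos h, if_pos (by omega)]; simp
    · rw [if_neg h, if_neg (by omega)]
  | cons nm rest ih =>
    intro last d h
    have h2 : nm.length = 2 := h nm (List.mem_cons_self ..)
    match nm, h2 with
    | [st, et], _ =>
      have hrest : ∀ x ∈ rest, x.length = 2 := fun x hx => h x (List.mem_cons_of_mem _ hx)
      simp only [List.foldl_cons, pvStepA, pvGoB]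
      rw [pvFoldA_acc rest et ([] ++ [[last, st]])]
      rw [← ih et d hrest]
      simp only []
      by_cases hc : d - (rest.foldl pvStepA (et, [])).1 > 0
      · rw [if_pos hc, if_pos hc]; simp
      · rw [if_neg hc, if_neg hc]; simp

-- ===== VERDICT (by name: the statement is the Claim_ definition above) =====
theorem get_mute_section_array_spec : Claim_equal_get_mute_section_array := by
  intro na d _ hpre
  exact pvA_eq_goB na 0 d hpre
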